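-- pv_equiv track=rewrite | github.com/pydemo/sql_parse | include/base.py | split_equally_by_words
-- ===== SOURCE A (Python) =====
-- def split_equally_by_words(text, num_lines=2):
-- 	# Split the text by spaces to get words
-- 	words = text.split()
--
-- 	# Calculate roughly the number of words per line
-- 	words_per_line = max(1, len(words) // num_lines)
--
-- 	# Create a list to hold the lines
-- 	lines = []
--
-- 	# Split the words into lines
-- 	for i in range(num_lines - 1):
-- 		# Take the next slice of words_per_line words
-- 		line = ' '.join(words[i*words_per_line:(i+1)*words_per_line])
-- 		lines.append(line)
--
-- 	# Add the last line, which includes the remaining words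
-- 	lines.append(' '.join(words[(num_lines - 1)*words_per_line:]))
--
-- 	# If the last line is significantly shorter, redistribute the words
-- 	if lines[-1] and len(lines[-1].split()) < words_per_line / 2:
-- 		# Redistribute the words more evenly
-- 		return split_equally_by_words(text, num_lines - 1)
--
-- 	return lines
-- ===== SOURCE B (Python) =====
-- def split_equally_by_words(text, num_lines=2):
--     words = text.split()
--     W = len(words)
--     # Find the final line count arithmetically, without building any lines:
--     # with n lines, the last line holds rem = W - (n-1)*wpl words; drop a line
--     # while that remainder is nonempty yet shorter than half a full line.
--     n = num_lines
--     while n > 1: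
--         wpl = max(1, W // n)
--         rem = W - (n - 1) * wpl
--         if 0 < rem and 2 * rem < wpl:
--             n -= 1
--         else:
--             break
--     # Build the lines once, for the final n.
--     wpl = max(1, W // n)
--     lines = [' '.join(words[i * wpl:(i + 1) * wpl]) for i in range(n - 1)]
--     lines.append(' '.join(words[(n - 1) * wpl:]))
--     return lines
-- ===== Notes on version B (the rewrite author's own statement) =====
-- stated objective: alternative
-- what changed: A retries by recursively re-splitting the text and rebuilding and re-splitting all the line strings to test the last line; B first finds the final line count with a purely arithmetic loop (the last line's word count is len(words) - (n-1)*words_per_line, so no joins or splits are needed while retrying) and then builds the lines exactly once.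
-- outside the precondition, e.g. on split_equally_by_words('a b', 0): A raises ZeroDivisionError, B raises ZeroDivisionError
import Mathlib
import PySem

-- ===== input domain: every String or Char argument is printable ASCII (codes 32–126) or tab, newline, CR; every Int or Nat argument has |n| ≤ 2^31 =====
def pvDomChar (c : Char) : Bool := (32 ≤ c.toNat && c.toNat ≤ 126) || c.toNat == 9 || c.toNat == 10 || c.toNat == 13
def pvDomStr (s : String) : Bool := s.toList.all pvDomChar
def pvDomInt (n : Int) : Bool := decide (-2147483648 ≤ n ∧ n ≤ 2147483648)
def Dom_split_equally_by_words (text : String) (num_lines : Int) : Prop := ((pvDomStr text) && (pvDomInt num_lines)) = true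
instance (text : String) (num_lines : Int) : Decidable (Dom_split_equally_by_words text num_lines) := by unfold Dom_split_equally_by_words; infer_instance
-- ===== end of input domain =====

-- B replaces A's rebuild-and-retry recursion by first finding the final line count
-- with a purely arithmetic loop (no joins/splits while retrying) and building the
-- lines exactly once (objective: alternative decomposition).

-- ===== PORT A =====
-- A word of text.split(): nonempty and free of whitespace characters.
def pvGoodWord (w : List Char) : Prop := w ≠ [] ∧ ∀ c ∈ w, PySem.Chars.isspace c = false

-- Every word produced by split() is a good word (invariant of split₀.go).
theorem pvGo_good (s : List Char) : ∀ (cur : List Char) (acc : List (List Char)),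
    (∀ c ∈ cur, PySem.Chars.isspace c = false) → (∀ w ∈ acc, pvGoodWord w) →
    ∀ w ∈ PySem.Chars.split₀.go s cur acc, pvGoodWord w := by
  induction s with
  | nil =>
    intro cur acc hcur hacc w hw
    simp only [PySem.Chars.split₀.go] at hw
    split at hw
    · exact hacc w (by simpa using hw)
    · rcases (by simpa using hw : w ∈ acc ∨ w = cur.reverse) with h | h
      · exact hacc w h
      · subst h
        refine ⟨by simpa using ‹¬ cur.isEmpty = true›, ?_⟩
        intro c hc; exact hcur c (by simpa using hc)
  | cons c rest ih =>
    intro cur acc hcur hacc w hw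
    simp only [PySem.Chars.split₀.go] at hw
    split at hw
    · split at hw
      · exact ih [] acc (by simp) hacc w hw
      · refine ih [] _ (by simp) ?_ w hw
        intro v hv
        rcases List.mem_cons.mp hv with hv | hv
        · subst hv
          refine ⟨by simpa using ‹¬ cur.isEmpty = true›, ?_⟩
          intro d hd; exact hcur d (by simpa using hd)
        · exact hacc v hv
    · rename_i hns
      refine ih _ acc ?_ hacc w hw
      intro e he
      rcases List.mem_cons.mp he with he | he
      · subst he; simpa using hns
      · exact hcur e he

theorem pvSplit_good (cs : List Char) : ∀ w ∈ PySem.Chars.split₀ cs, pvGoodWord w := by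
  simpa [PySem.Chars.split₀] using pvGo_good cs [] [] (by simp) (by simp)

-- Consuming one whitespace-free word moves it wholesale into the accumulator.
theorem pvGo_word (w : List Char) (hw : ∀ c ∈ w, PySem.Chars.isspace c = false) :
    ∀ (s cur : List Char) (acc : List (List Char)),
      PySem.Chars.split₀.go (w ++ s) cur acc = PySem.Chars.split₀.go s (w.reverse ++ cur) acc := by
  induction w with
  | nil => intro s cur acc; simp
  | cons c t ih =>
    intro s cur acc
    have hc : PySem.Chars.isspace c = false := hw c (by simp)
    simp only [List.cons_append, PySem.Chars.split₀.go, hc]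
    rw [ih (fun d hd => hw d (by simp [hd])) s (c :: cur) acc]
    simp

-- split(' '.join(ws)) = ws for a list of good words.
theorem pvGo_join (ws : List (List Char)) (h : ∀ w ∈ ws, pvGoodWord w) :
    ∀ acc, PySem.Chars.split₀.go (PySem.Chars.join [' '] ws) [] acc = acc.reverse ++ ws := by
  induction ws with
  | nil => intro acc; simp [PySem.Chars.join_nil, PySem.Chars.split₀.go]
  | cons w t ih =>
    intro acc
    obtain ⟨hwne, hwns⟩ := h w (by simp)
    cases t with
    | nil =>
      rw [PySem.Chars.join_singleton]
      rw [show w = w ++ ([] : List Char) by simp, pvGo_word w hwns [] [] acc]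
      simp only [List.append_nil, PySem.Chars.split₀.go]
      have hie : w.reverse.isEmpty = false := by simpa using hwne
      rw [hie]
      simp
    | cons w' t' =>
      rw [PySem.Chars.join_cons_cons]
      rw [List.append_assoc, pvGo_word w hwns _ [] acc]
      have hsp : PySem.Chars.isspace ' ' = true := by decide
      simp only [List.append_nil, List.cons_append, List.nil_append, PySem.Chars.split₀.go, hsp]
      have hie : w.reverse.isEmpty = false := by simpa using hwne
      simp only [if_true, hie, Bool.false_eq_true, if_false]
      rw [ih (fun v hv => h v (by simp [hv])) (w.reverse.reverse :: acc)]
      simp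

-- Str-level corollaries for a list of good words (e.g. any slice of text.split()).
theorem pvJoin_eq_empty_iff (parts : List String)
    (h : ∀ p ∈ parts, pvGoodWord p.toList) :
    (PySem.Str.join " " parts = "") ↔ parts = [] := by
  constructor
  · intro he
    cases parts with
    | nil => rfl
    | cons p t =>
      exfalso
      have h1 : (PySem.Str.join " " (p :: t)).toList = [] := by rw [he]; decide
      rw [PySem.Str.join, String.toList_ofList] at h1
      obtain ⟨hpne, -⟩ := h p (by simp)
      cases t with
      | nil => rw [List.map_singleton, PySem.Chars.join_singleton] at h1; exact hpne h1
      | cons q t' =>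
        rw [List.map_cons, List.map_cons, PySem.Chars.join_cons_cons] at h1
        simp only [List.append_assoc, List.append_eq_nil_iff] at h1
        exact hpne h1.1
  · intro he; subst he; rfl

theorem pvSplit_join (parts : List String)
    (h : ∀ p ∈ parts, pvGoodWord p.toList) :
    PySem.Str.split₀ (PySem.Str.join " " parts) = parts := by
  have hg : ∀ w ∈ parts.map String.toList, pvGoodWord w := by
    intro w hw
    obtain ⟨p, hp, rfl⟩ := List.mem_map.mp hw
    exact h p hp
  have hchars : PySem.Chars.split₀ (PySem.Str.join " " parts).toList
      = parts.map String.toList := by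
    rw [PySem.Str.join, String.toList_ofList, PySem.Chars.split₀]
    simpa using pvGo_join (parts.map String.toList) hg []
  have := PySem.Str.split₀_map_toList (PySem.Str.join " " parts)
  rw [hchars] at this
  have hinj : Function.Injective String.toList := fun a b hab => String.toList_inj.mp hab
  exact List.map_injective_iff.mpr hinj this

-- lines[-1] on lines ++ [last] is last
theorem pvGetLast {α : Type} (l : List α) (x : α) (d : α) :
    (PySem.List.pyGet? (l ++ [x]) (-1)).getD d = x := by
  simp [PySem.List.pyGet?, PySem.List.pyIdx?]

-- every element of a slice of text.split() is a good word
theorem pvSlice_good (text : String) (a b : Option Int) :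
    ∀ p ∈ PySem.List.slice (PySem.Str.split₀ text) a b, pvGoodWord p.toList := by
  intro p hp
  have hmem : p ∈ PySem.Str.split₀ text := PySem.List.mem_of_mem_slice _ a b hp
  have hmem' : p.toList ∈ PySem.Chars.split₀ text.toList := by
    rw [← PySem.Str.split₀_map_toList]; exact List.mem_map_of_mem hmem
  exact pvSplit_good text.toList _ hmem'

-- From A's retry guard the current line count is at least 2 (termination of A).
theorem pvGuard_two (text : String) (num_lines : Int)
    (hne : PySem.Str.join " " (PySem.List.slice (PySem.Str.split₀ text)
        (some ((num_lines - 1) * max 1 (PySem.Int.floordiv ((PySem.Str.split₀ text).length : Int) num_lines))) none) ≠ "")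
    (hlt : 2 * ((PySem.Str.split₀ (PySem.Str.join " " (PySem.List.slice (PySem.Str.split₀ text)
        (some ((num_lines - 1) * max 1 (PySem.Int.floordiv ((PySem.Str.split₀ text).length : Int) num_lines))) none))).length : Int)
        < max 1 (PySem.Int.floordiv ((PySem.Str.split₀ text).length : Int) num_lines)) :
    2 ≤ num_lines := by
  set words := PySem.Str.split₀ text with hwords
  set W : Int := (words.length : Int) with hW
  set wpl : Int := max 1 (PySem.Int.floordiv W num_lines) with hwpl
  set parts := PySem.List.slice words (some ((num_lines - 1) * wpl)) none with hparts
  have hgood : ∀ p ∈ parts, pvGoodWord p.toList := pvSlice_good text _ _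
  have hpne : parts ≠ [] := fun hnil => hne ((pvJoin_eq_empty_iff parts hgood).mpr hnil)
  have hlen : PySem.Str.split₀ (PySem.Str.join " " parts) = parts := pvSplit_join parts hgood
  rw [hlen] at hlt
  have hone : 1 ≤ (parts.length : Int) := by
    have : 0 < parts.length := List.length_pos_iff.mpr hpne
    exact_mod_cast this
  have hwpl3 : 3 ≤ wpl := by omega
  have hfd3 : 3 ≤ PySem.Int.floordiv W num_lines := by
    rcases max_choice 1 (PySem.Int.floordiv W num_lines) with hm | hm <;> omega
  -- floordiv W n ≥ 3 with W ≥ 0 forces n ≥ 1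
  have hWnn : 0 ≤ W := by positivity
  by_contra hcon
  push_neg at hcon
  -- now num_lines ≤ 1; show floordiv W num_lines < 3 in each case
  rcases lt_trichotomy num_lines 0 with hneg | hzero | hpos
  · obtain ⟨-, hm2⟩ := PySem.Int.mod_neg_bounds W hneg
    have heq := PySem.Int.floordiv_mul_add_mod W num_lines
    nlinarith [heq, hfd3]
  · subst hzero
    have : PySem.Int.floordiv W 0 = 0 := by simp [PySem.Int.floordiv]
    omega
  · have h1 : num_lines = 1 := by omega
    have hfd : PySem.Int.floordiv W num_lines = W := by
      rw [h1, PySem.Int.floordiv_eq_ediv_of_pos (by norm_num)]; simp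
    have hs0 : (num_lines - 1) * wpl = 0 := by rw [h1]; ring
    have hpw : parts = words := by
      rw [hparts, hs0, PySem.List.slice_zero_start, PySem.List.slice_none_none]
    have hl2 : (parts.length : Int) = W := by rw [hpw]
    rw [hwpl, hfd] at hlt
    rcases max_choice 1 W with hm | hm <;> omega

def split_equally_by_words (text : String) (num_lines : Int) : List String :=
  let words := PySem.Str.split₀ text
  -- Pre_ excludes num_lines = 0, where Python's '//' raises ZeroDivisionError
  let words_per_line := max 1 (PySem.Int.floordiv (words.length : Int) num_lines)
  let lines := (PySem.List.pyRange 0 (num_lines - 1) 1).foldl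
      (fun ls i => ls ++ [PySem.Str.join " "
        (PySem.List.slice words (some (i * words_per_line)) (some ((i + 1) * words_per_line)))]) []
  let allLines := lines ++ [PySem.Str.join " "
      (PySem.List.slice words (some ((num_lines - 1) * words_per_line)) none)]
  -- allLines is nonempty by construction, so lines[-1] cannot raise: getD "" is exact;
  -- 'len(...) < words_per_line / 2' on ints is exactly '2 * len(...) < words_per_line'
  let lastLine := (PySem.List.pyGet? allLines (-1)).getD ""
  if h : lastLine ≠ "" ∧ 2 * ((PySem.Str.split₀ lastLine).length : Int) < words_per_line then
    split_equally_by_words text (num_lines - 1)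
  else
    allLines
  termination_by num_lines.toNat
  decreasing_by
    obtain ⟨hne, hlt⟩ := h
    simp only [lastLine, allLines, lines, words_per_line, words] at hne hlt
    rw [pvGetLast] at hne hlt
    have h2 : 2 ≤ num_lines := pvGuard_two text num_lines hne hlt
    omega

-- ===== PORT B =====
-- the 'while n > 1: … n -= 1 … break' loop of B, as structural recursion on n
def pvAltLineCount (W n : Int) : Int :=
  if h : 1 < n then
    let wpl := max 1 (PySem.Int.floordiv W n)
    let rem := W - (n - 1) * wpl
    if 0 < rem ∧ 2 * rem < wpl then pvAltLineCount W (n - 1) else n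
  else n
  termination_by n.toNat
  decreasing_by omega

def split_equally_by_words_alt (text : String) (num_lines : Int) : List String :=
  let words := PySem.Str.split₀ text
  let W : Int := (words.length : Int)
  let n := pvAltLineCount W num_lines
  let wpl := max 1 (PySem.Int.floordiv W n)
  (PySem.List.pyRange 0 (n - 1) 1).map (fun i =>
      PySem.Str.join " " (PySem.List.slice words (some (i * wpl)) (some ((i + 1) * wpl))))
    ++ [PySem.Str.join " " (PySem.List.slice words (some ((n - 1) * wpl)) none)]

-- ===== PRECONDITION & SPEC =====
-- Pre_ excludes exactly num_lines = 0, where A raises ZeroDivisionError ('len(words) // num_lines').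
def Pre_split_equally_by_words (text : String) (num_lines : Int) : Prop := num_lines ≠ 0
instance (text : String) (num_lines : Int) : Decidable (Pre_split_equally_by_words text num_lines) := by
  unfold Pre_split_equally_by_words; infer_instance

def pvWitness_split_equally_by_words : String × Int := ("one two three four", 3)

def Spec_split_equally_by_words (text : String) (num_lines : Int) (out : List String) : Prop :=
  out = split_equally_by_words_alt text num_lines
instance (text : String) (num_lines : Int) (out : List String) : Decidable (Spec_split_equally_by_words text num_lines out) := by
  unfold Spec_split_equally_by_words; infer_instance

-- ===== CLAIM (what is proved, stated in full; the proofs are below) =====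
def Claim_equal_split_equally_by_words : Prop := ∀ (text : String) (num_lines : Int), Dom_split_equally_by_words text num_lines → Pre_split_equally_by_words text num_lines → Spec_split_equally_by_words text num_lines (split_equally_by_words text num_lines)

-- ===== LEMMAS AND PROOFS =====

theorem pvStop (W n : Int) (h : ¬ 1 < n) : pvAltLineCount W n = n := by
  rw [pvAltLineCount]; simp [h]

theorem pvStep (W n : Int) (h : 1 < n)
    (hc : 0 < W - (n - 1) * max 1 (PySem.Int.floordiv W n) ∧
      2 * (W - (n - 1) * max 1 (PySem.Int.floordiv W n)) < max 1 (PySem.Int.floordiv W n)) :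
    pvAltLineCount W n = pvAltLineCount W (n - 1) := by
  rw [pvAltLineCount]
  simp only [dif_pos h]
  exact if_pos hc

theorem pvNoStep (W n : Int) (h : 1 < n)
    (hc : ¬ (0 < W - (n - 1) * max 1 (PySem.Int.floordiv W n) ∧
      2 * (W - (n - 1) * max 1 (PySem.Int.floordiv W n)) < max 1 (PySem.Int.floordiv W n))) :
    pvAltLineCount W n = n := by
  rw [pvAltLineCount]
  simp only [dif_pos h]
  exact if_neg hc

-- A's guard and B's arithmetic loop condition agree (for any current count n ≥ 1)
theorem pvGuard_iff (text : String) (n : Int) (h1 : 1 ≤ n) :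
    (PySem.Str.join " " (PySem.List.slice (PySem.Str.split₀ text)
        (some ((n - 1) * max 1 (PySem.Int.floordiv ((PySem.Str.split₀ text).length : Int) n))) none) ≠ "" ∧
     2 * ((PySem.Str.split₀ (PySem.Str.join " " (PySem.List.slice (PySem.Str.split₀ text)
        (some ((n - 1) * max 1 (PySem.Int.floordiv ((PySem.Str.split₀ text).length : Int) n))) none))).length : Int)
        < max 1 (PySem.Int.floordiv ((PySem.Str.split₀ text).length : Int) n)) ↔
    (0 < ((PySem.Str.split₀ text).length : Int) - (n - 1) * max 1 (PySem.Int.floordiv ((PySem.Str.split₀ text).length : Int) n) ∧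
     2 * (((PySem.Str.split₀ text).length : Int) - (n - 1) * max 1 (PySem.Int.floordiv ((PySem.Str.split₀ text).length : Int) n))
        < max 1 (PySem.Int.floordiv ((PySem.Str.split₀ text).length : Int) n)) := by
  set words := PySem.Str.split₀ text with hwords
  set W : Int := (words.length : Int) with hW
  set wpl : Int := max 1 (PySem.Int.floordiv W n) with hwpl
  set st : Int := (n - 1) * wpl with hst
  set parts := PySem.List.slice words (some st) none with hparts
  have hwpl1 : 1 ≤ wpl := le_max_left _ _
  have hst0 : 0 ≤ st := by
    rw [hst]; exact mul_nonneg (by omega) (by omega)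
  have hgood : ∀ p ∈ parts, pvGoodWord p.toList := pvSlice_good text _ _
  have hjoin : (PySem.Str.join " " parts = "") ↔ parts = [] := pvJoin_eq_empty_iff parts hgood
  have hsplit : PySem.Str.split₀ (PySem.Str.join " " parts) = parts := pvSplit_join parts hgood
  have hdrop : parts = words.drop st.toNat := by
    rw [hparts]; exact PySem.List.slice_from words hst0
  have hlen : parts.length = words.length - st.toNat := by
    rw [hdrop, List.length_drop]
  have hnil : parts = [] ↔ words.length ≤ st.toNat := by
    rw [hdrop, List.drop_eq_nil_iff]
  rw [hsplit]
  constructor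
  · rintro ⟨hne, hlt⟩
    have hpne : ¬ words.length ≤ st.toNat := fun h0 => hne (hjoin.mpr (hnil.mpr h0))
    refine ⟨by omega, by omega⟩
  · rintro ⟨hpos, hlt⟩
    have hlt' : st.toNat < words.length := by omega
    have hpne : parts ≠ [] := fun h0 => absurd (hnil.mp h0) (by omega)
    refine ⟨fun h0 => hpne (hjoin.mp h0), by omega⟩

theorem pvMain (text : String) : ∀ (k : Nat) (num_lines : Int), num_lines.toNat ≤ k →
    split_equally_by_words text num_lines = split_equally_by_words_alt text num_lines := by
  intro k
  induction k with
  | zero =>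
    intro n hn
    unfold split_equally_by_words
    simp only [pvGetLast]
    split
    case isTrue hg =>
      exact absurd (pvGuard_two text n hg.1 hg.2) (by omega)
    case isFalse hg =>
      simp only [split_equally_by_words_alt]
      rw [pvStop ((PySem.Str.split₀ text).length : Int) n (by omega)]
      rw [PySem.List.foldl_append_singleton_eq_map]
      simp
  | succ k ih =>
    intro n hn
    unfold split_equally_by_words
    simp only [pvGetLast]
    split
    case isTrue hg =>
      have h2 : 2 ≤ n := pvGuard_two text n hg.1 hg.2
      have hcond := (pvGuard_iff text n (by omega)).mp hg
      rw [ih (n - 1) (by omega)]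
      simp only [split_equally_by_words_alt]
      rw [pvStep ((PySem.Str.split₀ text).length : Int) n (by omega) hcond]
    case isFalse hg =>
      simp only [split_equally_by_words_alt]
      by_cases h1 : 1 < n
      · have hcond : ¬ _ := fun hc => hg ((pvGuard_iff text n (by omega)).mpr hc)
        rw [pvNoStep ((PySem.Str.split₀ text).length : Int) n h1 hcond]
        rw [PySem.List.foldl_append_singleton_eq_map]
        simp
      · rw [pvStop ((PySem.Str.split₀ text).length : Int) n h1]
        rw [PySem.List.foldl_append_singleton_eq_map]
        simp

-- ===== VERDICT (by name: the statement is the Claim_ definition above) =====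
theorem split_equally_by_words_spec : Claim_equal_split_equally_by_words := by
  intro text num_lines _ _
  unfold Spec_split_equally_by_words
  exact pvMain text num_lines.toNat num_lines le_rfl
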